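-- pv_equiv track=rewrite | github.com/hyeon-bs/programmers | Python3/프로그래머스/0/120585. 머쓱이보다 키 큰 사람/머쓱이보다 키 큰 사람.py | solution
-- ===== SOURCE A (Python) =====
-- def solution(array, height):
--     answer = 0
--     result = []
--
--     for i in range(len(array)):
--         if height < array[i]:
--             answer+= 1
--         else:
--             answer = 0
--     return answer
-- ===== SOURCE B (Python) =====
-- def solution(array, height):
--     count = 0
--     for x in reversed(array):
--         if x > height:
--             count += 1
--         else:
--             break
--     return count
-- ===== Notes on version B (the rewrite author's own statement) =====
-- stated objective: simpler
-- what changed: Replaces A's forward full scan with reset-to-zero by a backward scan over reversed(array) that counts the trailing run and breaks at the first element not taller than height.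
import Mathlib
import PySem

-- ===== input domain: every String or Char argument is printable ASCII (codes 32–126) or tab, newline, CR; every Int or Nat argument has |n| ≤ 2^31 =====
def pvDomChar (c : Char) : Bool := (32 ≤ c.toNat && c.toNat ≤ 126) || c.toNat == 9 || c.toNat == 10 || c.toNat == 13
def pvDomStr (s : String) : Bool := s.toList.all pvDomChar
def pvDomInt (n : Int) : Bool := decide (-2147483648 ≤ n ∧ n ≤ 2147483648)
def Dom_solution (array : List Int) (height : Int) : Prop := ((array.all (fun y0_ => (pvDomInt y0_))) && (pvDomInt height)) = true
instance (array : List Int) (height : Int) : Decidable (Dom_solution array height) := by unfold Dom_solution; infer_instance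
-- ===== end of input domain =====

-- B differs from A only in strategy; same return value. Header: B scans from the back and stops early.

-- ===== PORT A =====
-- A: forward loop over all indices, increment answer when height < array[i], else reset answer to 0.
def solution (array : List Int) (height : Int) : Int :=
  array.foldl (fun answer x => if height < x then answer + 1 else 0) 0

-- ===== PORT B =====
-- B's loop: iterate over reversed(array), count while x > height, break at first failure.
def solutionAltLoop (height : Int) : List Int → Int
  | [] => 0
  | x :: rest => if height < x then solutionAltLoop height rest + 1 else 0

def solution_alt (array : List Int) (height : Int) : Int :=
  solutionAltLoop height array.reverse

-- ===== PRECONDITION & SPEC =====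
def Spec_solution (array : List Int) (height : Int) (out : Int) : Prop := out = solution_alt array height
instance (array : List Int) (height : Int) (out : Int) : Decidable (Spec_solution array height out) := by unfold Spec_solution; infer_instance

-- ===== CLAIM (what is proved, stated in full; the proofs are below) =====
def Claim_equal_solution : Prop := ∀ (array : List Int) (height : Int), Dom_solution array height → Spec_solution array height (solution array height)

-- ===== LEMMAS AND PROOFS =====
theorem solution_eq_alt (array : List Int) (height : Int) :
    solution array height = solution_alt array height := by
  unfold solution solution_alt
  induction array using List.reverseRecOn with
  | nil => simp [solutionAltLoop]
  | append_singleton xs x ih =>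
      rw [List.foldl_append, List.reverse_append]
      simp only [List.foldl, List.reverse_singleton, List.singleton_append, solutionAltLoop]
      split <;> simp [ih]

-- ===== VERDICT (by name: the statement is the Claim_ definition above) =====
theorem solution_spec : Claim_equal_solution := by
  intro array height _
  exact solution_eq_alt array height
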